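-- pv_equiv track=rewrite | github.com/MrL8199/Image-processing-tictactoe | realtimedetect.py | get_status
-- ===== SOURCE A (Python) =====
-- def get_status(board_stage):
--     isEnd = True
--
--     # check 2 đường chéo
--     if (board_stage[1][1] != "_"):
--         if ((board_stage[0][0] == board_stage[1][1]) and (board_stage[1][1] == board_stage[2][2])):
--             return board_stage[1][1] + " thắng!"
--         if ((board_stage[0][2] == board_stage[1][1]) and (board_stage[1][1] == board_stage[2][0])):
--             return board_stage[1][1] + " thắng!"
--
--             # check các cột ngang
--     for i in range(0, len(board_stage)):
--         # check ending
--         if (isEnd):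
--             for j in range(0, len(board_stage)):
--                 if (board_stage[i][j] == '_'):
--                     isEnd = False
--                     break
--         if ((board_stage[i][0] == board_stage[i][1]) and (board_stage[i][0] == board_stage[i][2]) and (
--                 board_stage[i][0] != "_")):
--             return board_stage[i][0] + " thắng!"
--         if ((board_stage[0][i] == board_stage[1][i]) and (board_stage[0][i] == board_stage[2][i]) and (
--                 board_stage[0][i] != "_")):
--             return board_stage[0][i] + " thắng!"
--     if (isEnd):
--         return "Hòa"
--     return "Ván chưa kết thúc"
-- ===== SOURCE B (Python) =====
-- def get_status(board_stage):
--     # bitboard over the three rows of a tic-tac-toe board: one pass builds an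
--     # occupancy bitmask per symbol, then each winning line is a single integer
--     # containment test
--     top, mid, bot = board_stage
--     bits = {}
--     for r, row in enumerate((top, mid, bot)):
--         for c in range(3):
--             v = row[c]
--             bits[v] = bits.get(v, 0) | (1 << (3 * r + c))
--     # winning-line masks in priority order: main diag, anti diag,
--     # then row i / column i for i = 0, 1, 2
--     for m in (0o421, 0o124, 0o007, 0o111, 0o070, 0o222, 0o700, 0o444):
--         for v, occ in bits.items():
--             if v != "_" and occ & m == m:
--                 return v + " thắng!"
--     if "_" not in bits:
--         return "Hòa"
--     return "Ván chưa kết thúc"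
-- ===== Notes on version B (the rewrite author's own statement) =====
-- stated objective: alternative
-- what changed: Replaces A's cell-by-cell line comparisons and interleaved isEnd flag by a bitboard: one pass builds a per-symbol occupancy bitmask dict, each winning line becomes an integer AND-containment test against a fixed mask tuple (in A's priority order), and fullness is just a dict membership test for '_'.
-- outside the precondition, e.g. on get_status([['', '_'], ['', '_'], ['', '_']]): A returns ' thắng!', B raises IndexError
import Mathlib
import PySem

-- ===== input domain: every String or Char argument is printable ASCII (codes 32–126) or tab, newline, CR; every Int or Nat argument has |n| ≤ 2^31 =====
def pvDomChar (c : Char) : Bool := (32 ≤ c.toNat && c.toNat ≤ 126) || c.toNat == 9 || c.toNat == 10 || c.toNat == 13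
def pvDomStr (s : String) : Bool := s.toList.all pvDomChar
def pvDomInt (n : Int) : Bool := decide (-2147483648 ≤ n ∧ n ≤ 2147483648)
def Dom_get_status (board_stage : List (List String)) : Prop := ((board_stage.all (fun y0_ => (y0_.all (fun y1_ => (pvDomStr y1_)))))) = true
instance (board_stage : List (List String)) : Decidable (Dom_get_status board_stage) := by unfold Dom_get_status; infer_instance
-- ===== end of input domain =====

-- B replaces A's cell-by-cell line comparisons and interleaved isEnd flag by a bitboard:
-- one pass builds a per-symbol occupancy-bitmask dict, each winning line is an integer
-- AND-containment test against a fixed mask (in A's priority order), and fullness is a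
-- dict membership test for "_"; objective: alternative. Equality is proved on 3-row boards (Pre_).

-- ===== PORT A =====
-- board_stage[i][j]; under Pre_ (3 rows of ≥ 3 cells, indices used are 0..2) every access
-- is in range, so the getD defaults never fire and this is exact.
def pvCell (b : List (List String)) (i j : Int) : String :=
  (PySem.List.pyGet? ((PySem.List.pyGet? b i).getD []) j).getD ""

-- inner 'for j in range(...): if cell == "_": isEnd = False; break'
def pvInner (b : List (List String)) (i : Int) : List Int → Bool
  | [] => true
  | j :: rest => if pvCell b i j = "_" then false else pvInner b i rest

-- the 'for i in range(0, len(board_stage))' loop; .inl = early return, .inr = final isEnd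
def pvLoopA (b : List (List String)) : List Int → Bool → String ⊕ Bool
  | [], isEnd => .inr isEnd
  | i :: rest, isEnd =>
    let isEnd' := if isEnd then pvInner b i (PySem.List.pyRange 0 (Int.ofNat b.length) 1) else isEnd
    if pvCell b i 0 = pvCell b i 1 ∧ pvCell b i 0 = pvCell b i 2 ∧ pvCell b i 0 ≠ "_" then
      .inl (pvCell b i 0 ++ " thắng!")
    else if pvCell b 0 i = pvCell b 1 i ∧ pvCell b 0 i = pvCell b 2 i ∧ pvCell b 0 i ≠ "_" then
      .inl (pvCell b 0 i ++ " thắng!")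
    else pvLoopA b rest isEnd'

def get_status (board_stage : List (List String)) : String :=
  let c := pvCell board_stage 1 1
  if c ≠ "_" ∧ pvCell board_stage 0 0 = c ∧ c = pvCell board_stage 2 2 then c ++ " thắng!"
  else if c ≠ "_" ∧ pvCell board_stage 0 2 = c ∧ c = pvCell board_stage 2 0 then c ++ " thắng!"
  else
    match pvLoopA board_stage (PySem.List.pyRange 0 (Int.ofNat board_stage.length) 1) true with
    | .inl s => s
    | .inr isEnd => if isEnd then "Hòa" else "Ván chưa kết thúc"

-- ===== PORT B =====
-- row[c]; under Pre_ every access is in range, so the getD default never fires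
def pvAt (row : List String) (c : Int) : String :=
  (PySem.List.pyGet? row c).getD ""

-- 'bits[v] = bits.get(v, 0) | (1 << (3*r+c))' over enumerate((top, mid, bot)) x range(3)
def pvBits3 (top mid bot : List String) : PySem.Dict String Nat :=
  [((0 : Int), top), (1, mid), (2, bot)].foldl (fun d rp =>
    (PySem.List.pyRange 0 3 1).foldl (fun d c =>
      d.insert (pvAt rp.2 c) (d.getD (pvAt rp.2 c) 0 ||| (1 <<< (3 * rp.1 + c).toNat))) d)
    PySem.Dict.empty

-- 'for v, occ in bits.items(): if v != "_" and occ & m == m: return v + " thắng!"'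
def pvScanItems (m : Nat) : List (String × Nat) → Option String
  | [] => none
  | (v, occ) :: rest =>
    if v ≠ "_" ∧ occ &&& m = m then some (v ++ " thắng!") else pvScanItems m rest

-- 'for m in (…):' over the winning-line masks; the first hit is the early return
def pvWinMasks (bits : PySem.Dict String Nat) : List Nat → Option String
  | [] => none
  | m :: ms => (pvScanItems m bits.items).orElse fun _ => pvWinMasks bits ms

-- 'top, mid, bot = board_stage' raises ValueError unless there are exactly 3 rows;
-- those inputs are outside Pre_, the "" default there is never claimed about
def get_status_alt (board_stage : List (List String)) : String :=
  match board_stage with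
  | [top, mid, bot] =>
    let bits := pvBits3 top mid bot
    (pvWinMasks bits [273, 84, 7, 73, 56, 146, 448, 292]).getD
      (if bits.contains "_" = false then "Hòa" else "Ván chưa kết thúc")
  | _ => ""

-- ===== PRECONDITION & SPEC =====
-- Pre_ restricts to boards of exactly 3 rows, each with at least 3 cells (A only ever reads
-- columns 0-2 then): the game's natural domain. Outside it B raises (ValueError unpacking
-- a non-3-row board, IndexError on short rows) while A may still return a value there,
-- read off however many extra rows/columns its loop bound reaches.
def Pre_get_status (board_stage : List (List String)) : Prop :=
  board_stage.length = 3 ∧ ∀ row ∈ board_stage, 3 ≤ row.length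
instance (board_stage : List (List String)) : Decidable (Pre_get_status board_stage) := by
  unfold Pre_get_status; infer_instance

def pvWitness_get_status : List (List String) :=
  [["x", "o", "x"], ["o", "x", "o"], ["o", "x", "x"]]

def Spec_get_status (board_stage : List (List String)) (out : String) : Prop := out = get_status_alt board_stage
instance (board_stage : List (List String)) (out : String) : Decidable (Spec_get_status board_stage out) := by unfold Spec_get_status; infer_instance

-- ===== CLAIM (what is proved, stated in full; the proofs are below) =====
def Claim_equal_get_status : Prop := ∀ (board_stage : List (List String)), Dom_get_status board_stage → Pre_get_status board_stage → Spec_get_status board_stage (get_status board_stage)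

-- ===== LEMMAS AND PROOFS =====

-- proof-only mirror of the dict-building loop, over an explicit (symbol, bit-index) list
def pvMkBits (ps : List (String × Nat)) : PySem.Dict String Nat :=
  ps.foldl (fun d p => d.insert p.1 (d.getD p.1 0 ||| (1 <<< p.2))) PySem.Dict.empty

-- the occupancy mask of symbol v described directly as a fold over the pairs
def pvOrMask (ps : List (String × Nat)) (v : String) : Nat :=
  ps.foldl (fun acc p => if p.1 = v then acc ||| (1 <<< p.2) else acc) 0

theorem pvMkBits_getD_aux (ps : List (String × Nat)) (d : PySem.Dict String Nat) (v : String) :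
    (ps.foldl (fun d p => d.insert p.1 (d.getD p.1 0 ||| (1 <<< p.2))) d).getD v 0
      = ps.foldl (fun acc p => if p.1 = v then acc ||| (1 <<< p.2) else acc) (d.getD v 0) := by
  induction ps generalizing d with
  | nil => rfl
  | cons p rest ih =>
    simp only [List.foldl_cons]
    rw [ih]
    congr 1
    rw [PySem.Dict.getD_insert]
    by_cases h : v = p.1
    · rw [if_pos h, if_pos h.symm, h]
    · rw [if_neg h, if_neg (fun hh => h hh.symm)]

theorem pvMkBits_getD (ps : List (String × Nat)) (v : String) :
    (pvMkBits ps).getD v 0 = pvOrMask ps v := by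
  unfold pvMkBits pvOrMask
  rw [pvMkBits_getD_aux]
  simp [PySem.Dict.getD_empty]

theorem pvShift_testBit (k t : Nat) : (1 <<< k).testBit t = decide (k = t) := by
  simp [Nat.one_shiftLeft, Nat.testBit_two_pow]

theorem pvOrMask_testBit_aux (ps : List (String × Nat)) (v : String) (acc t : Nat) :
    (ps.foldl (fun acc p => if p.1 = v then acc ||| (1 <<< p.2) else acc) acc).testBit t
      = (acc.testBit t || ps.any (fun p => decide (p.1 = v) && decide (p.2 = t))) := by
  induction ps generalizing acc with
  | nil => simp
  | cons p rest ih =>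
    simp only [List.foldl_cons, List.any_cons]
    by_cases h : p.1 = v
    · rw [if_pos h, ih]
      rw [Nat.testBit_or, pvShift_testBit]
      simp [h, Bool.or_assoc]
    · rw [if_neg h, ih]
      simp [h]

theorem pvOrMask_testBit (ps : List (String × Nat)) (v : String) (t : Nat) :
    (pvOrMask ps v).testBit t = true ↔ ∃ p ∈ ps, p.1 = v ∧ p.2 = t := by
  unfold pvOrMask
  rw [pvOrMask_testBit_aux]
  simp [Nat.zero_testBit]

theorem pvAndMaskIff (x m : Nat) : x &&& m = m ↔ ∀ t, m.testBit t = true → x.testBit t = true := by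
  constructor
  · intro h t ht
    have := congrArg (Nat.testBit · t) h
    simp [Nat.testBit_and, ht] at this
    exact this
  · intro h
    apply Nat.eq_of_testBit_eq
    intro t
    rw [Nat.testBit_and]
    cases hm : m.testBit t
    · simp
    · simp [h t hm]

theorem pvTb273 (t : Nat) : (273:Nat).testBit t = true ↔ t = 0 ∨ t = 4 ∨ t = 8 := by
  by_cases h : t < 9
  · interval_cases t <;> decide
  · have h2 : (273:Nat) < 2 ^ t := lt_of_lt_of_le (by norm_num) (Nat.pow_le_pow_right (by norm_num) (by omega : 9 ≤ t))
    simp [Nat.testBit_lt_two_pow h2]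
    omega

theorem pvTb84 (t : Nat) : (84:Nat).testBit t = true ↔ t = 2 ∨ t = 4 ∨ t = 6 := by
  by_cases h : t < 9
  · interval_cases t <;> decide
  · have h2 : (84:Nat) < 2 ^ t := lt_of_lt_of_le (by norm_num) (Nat.pow_le_pow_right (by norm_num) (by omega : 9 ≤ t))
    simp [Nat.testBit_lt_two_pow h2]
    omega

theorem pvTb7 (t : Nat) : (7:Nat).testBit t = true ↔ t = 0 ∨ t = 1 ∨ t = 2 := by
  by_cases h : t < 9
  · interval_cases t <;> decide
  · have h2 : (7:Nat) < 2 ^ t := lt_of_lt_of_le (by norm_num) (Nat.pow_le_pow_right (by norm_num) (by omega : 9 ≤ t))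
    simp [Nat.testBit_lt_two_pow h2]
    omega

theorem pvTb73 (t : Nat) : (73:Nat).testBit t = true ↔ t = 0 ∨ t = 3 ∨ t = 6 := by
  by_cases h : t < 9
  · interval_cases t <;> decide
  · have h2 : (73:Nat) < 2 ^ t := lt_of_lt_of_le (by norm_num) (Nat.pow_le_pow_right (by norm_num) (by omega : 9 ≤ t))
    simp [Nat.testBit_lt_two_pow h2]
    omega

theorem pvTb56 (t : Nat) : (56:Nat).testBit t = true ↔ t = 3 ∨ t = 4 ∨ t = 5 := by
  by_cases h : t < 9
  · interval_cases t <;> decide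
  · have h2 : (56:Nat) < 2 ^ t := lt_of_lt_of_le (by norm_num) (Nat.pow_le_pow_right (by norm_num) (by omega : 9 ≤ t))
    simp [Nat.testBit_lt_two_pow h2]
    omega

theorem pvTb146 (t : Nat) : (146:Nat).testBit t = true ↔ t = 1 ∨ t = 4 ∨ t = 7 := by
  by_cases h : t < 9
  · interval_cases t <;> decide
  · have h2 : (146:Nat) < 2 ^ t := lt_of_lt_of_le (by norm_num) (Nat.pow_le_pow_right (by norm_num) (by omega : 9 ≤ t))
    simp [Nat.testBit_lt_two_pow h2]
    omega

theorem pvTb448 (t : Nat) : (448:Nat).testBit t = true ↔ t = 6 ∨ t = 7 ∨ t = 8 := by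
  by_cases h : t < 9
  · interval_cases t <;> decide
  · have h2 : (448:Nat) < 2 ^ t := lt_of_lt_of_le (by norm_num) (Nat.pow_le_pow_right (by norm_num) (by omega : 9 ≤ t))
    simp [Nat.testBit_lt_two_pow h2]
    omega

theorem pvTb292 (t : Nat) : (292:Nat).testBit t = true ↔ t = 2 ∨ t = 5 ∨ t = 8 := by
  by_cases h : t < 9
  · interval_cases t <;> decide
  · have h2 : (292:Nat) < 2 ^ t := lt_of_lt_of_le (by norm_num) (Nat.pow_le_pow_right (by norm_num) (by omega : 9 ≤ t))
    simp [Nat.testBit_lt_two_pow h2]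
    omega

theorem pvW273 (a b c d e f g h i v : String) :
    (pvOrMask [(a,0),(b,1),(c,2),(d,3),(e,4),(f,5),(g,6),(h,7),(i,8)] v) &&& 273 = 273 ↔ (a = v ∧ e = v ∧ i = v) := by
  rw [pvAndMaskIff]
  constructor
  · intro hh
    have h1 := hh 0 ((pvTb273 0).2 (by omega))
    have h2 := hh 4 ((pvTb273 4).2 (by omega))
    have h3 := hh 8 ((pvTb273 8).2 (by omega))
    rw [pvOrMask_testBit] at h1 h2 h3
    simp at h1 h2 h3
    exact ⟨h1, h2, h3⟩
  · rintro ⟨h1, h2, h3⟩ t ht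
    rw [pvTb273] at ht
    rw [pvOrMask_testBit]
    rcases ht with rfl | rfl | rfl
    · exact ⟨(a, 0), by simp, h1, rfl⟩
    · exact ⟨(e, 4), by simp, h2, rfl⟩
    · exact ⟨(i, 8), by simp, h3, rfl⟩

theorem pvW84 (a b c d e f g h i v : String) :
    (pvOrMask [(a,0),(b,1),(c,2),(d,3),(e,4),(f,5),(g,6),(h,7),(i,8)] v) &&& 84 = 84 ↔ (c = v ∧ e = v ∧ g = v) := by
  rw [pvAndMaskIff]
  constructor
  · intro hh
    have h1 := hh 2 ((pvTb84 2).2 (by omega))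
    have h2 := hh 4 ((pvTb84 4).2 (by omega))
    have h3 := hh 6 ((pvTb84 6).2 (by omega))
    rw [pvOrMask_testBit] at h1 h2 h3
    simp at h1 h2 h3
    exact ⟨h1, h2, h3⟩
  · rintro ⟨h1, h2, h3⟩ t ht
    rw [pvTb84] at ht
    rw [pvOrMask_testBit]
    rcases ht with rfl | rfl | rfl
    · exact ⟨(c, 2), by simp, h1, rfl⟩
    · exact ⟨(e, 4), by simp, h2, rfl⟩
    · exact ⟨(g, 6), by simp, h3, rfl⟩

theorem pvW7 (a b c d e f g h i v : String) :
    (pvOrMask [(a,0),(b,1),(c,2),(d,3),(e,4),(f,5),(g,6),(h,7),(i,8)] v) &&& 7 = 7 ↔ (a = v ∧ b = v ∧ c = v) := by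
  rw [pvAndMaskIff]
  constructor
  · intro hh
    have h1 := hh 0 ((pvTb7 0).2 (by omega))
    have h2 := hh 1 ((pvTb7 1).2 (by omega))
    have h3 := hh 2 ((pvTb7 2).2 (by omega))
    rw [pvOrMask_testBit] at h1 h2 h3
    simp at h1 h2 h3
    exact ⟨h1, h2, h3⟩
  · rintro ⟨h1, h2, h3⟩ t ht
    rw [pvTb7] at ht
    rw [pvOrMask_testBit]
    rcases ht with rfl | rfl | rfl
    · exact ⟨(a, 0), by simp, h1, rfl⟩
    · exact ⟨(b, 1), by simp, h2, rfl⟩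
    · exact ⟨(c, 2), by simp, h3, rfl⟩

theorem pvW73 (a b c d e f g h i v : String) :
    (pvOrMask [(a,0),(b,1),(c,2),(d,3),(e,4),(f,5),(g,6),(h,7),(i,8)] v) &&& 73 = 73 ↔ (a = v ∧ d = v ∧ g = v) := by
  rw [pvAndMaskIff]
  constructor
  · intro hh
    have h1 := hh 0 ((pvTb73 0).2 (by omega))
    have h2 := hh 3 ((pvTb73 3).2 (by omega))
    have h3 := hh 6 ((pvTb73 6).2 (by omega))
    rw [pvOrMask_testBit] at h1 h2 h3
    simp at h1 h2 h3
    exact ⟨h1, h2, h3⟩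
  · rintro ⟨h1, h2, h3⟩ t ht
    rw [pvTb73] at ht
    rw [pvOrMask_testBit]
    rcases ht with rfl | rfl | rfl
    · exact ⟨(a, 0), by simp, h1, rfl⟩
    · exact ⟨(d, 3), by simp, h2, rfl⟩
    · exact ⟨(g, 6), by simp, h3, rfl⟩

theorem pvW56 (a b c d e f g h i v : String) :
    (pvOrMask [(a,0),(b,1),(c,2),(d,3),(e,4),(f,5),(g,6),(h,7),(i,8)] v) &&& 56 = 56 ↔ (d = v ∧ e = v ∧ f = v) := by
  rw [pvAndMaskIff]
  constructor
  · intro hh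
    have h1 := hh 3 ((pvTb56 3).2 (by omega))
    have h2 := hh 4 ((pvTb56 4).2 (by omega))
    have h3 := hh 5 ((pvTb56 5).2 (by omega))
    rw [pvOrMask_testBit] at h1 h2 h3
    simp at h1 h2 h3
    exact ⟨h1, h2, h3⟩
  · rintro ⟨h1, h2, h3⟩ t ht
    rw [pvTb56] at ht
    rw [pvOrMask_testBit]
    rcases ht with rfl | rfl | rfl
    · exact ⟨(d, 3), by simp, h1, rfl⟩
    · exact ⟨(e, 4), by simp, h2, rfl⟩
    · exact ⟨(f, 5), by simp, h3, rfl⟩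

theorem pvW146 (a b c d e f g h i v : String) :
    (pvOrMask [(a,0),(b,1),(c,2),(d,3),(e,4),(f,5),(g,6),(h,7),(i,8)] v) &&& 146 = 146 ↔ (b = v ∧ e = v ∧ h = v) := by
  rw [pvAndMaskIff]
  constructor
  · intro hh
    have h1 := hh 1 ((pvTb146 1).2 (by omega))
    have h2 := hh 4 ((pvTb146 4).2 (by omega))
    have h3 := hh 7 ((pvTb146 7).2 (by omega))
    rw [pvOrMask_testBit] at h1 h2 h3
    simp at h1 h2 h3
    exact ⟨h1, h2, h3⟩
  · rintro ⟨h1, h2, h3⟩ t ht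
    rw [pvTb146] at ht
    rw [pvOrMask_testBit]
    rcases ht with rfl | rfl | rfl
    · exact ⟨(b, 1), by simp, h1, rfl⟩
    · exact ⟨(e, 4), by simp, h2, rfl⟩
    · exact ⟨(h, 7), by simp, h3, rfl⟩

theorem pvW448 (a b c d e f g h i v : String) :
    (pvOrMask [(a,0),(b,1),(c,2),(d,3),(e,4),(f,5),(g,6),(h,7),(i,8)] v) &&& 448 = 448 ↔ (g = v ∧ h = v ∧ i = v) := by
  rw [pvAndMaskIff]
  constructor
  · intro hh
    have h1 := hh 6 ((pvTb448 6).2 (by omega))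
    have h2 := hh 7 ((pvTb448 7).2 (by omega))
    have h3 := hh 8 ((pvTb448 8).2 (by omega))
    rw [pvOrMask_testBit] at h1 h2 h3
    simp at h1 h2 h3
    exact ⟨h1, h2, h3⟩
  · rintro ⟨h1, h2, h3⟩ t ht
    rw [pvTb448] at ht
    rw [pvOrMask_testBit]
    rcases ht with rfl | rfl | rfl
    · exact ⟨(g, 6), by simp, h1, rfl⟩
    · exact ⟨(h, 7), by simp, h2, rfl⟩
    · exact ⟨(i, 8), by simp, h3, rfl⟩

theorem pvW292 (a b c d e f g h i v : String) :
    (pvOrMask [(a,0),(b,1),(c,2),(d,3),(e,4),(f,5),(g,6),(h,7),(i,8)] v) &&& 292 = 292 ↔ (c = v ∧ f = v ∧ i = v) := by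
  rw [pvAndMaskIff]
  constructor
  · intro hh
    have h1 := hh 2 ((pvTb292 2).2 (by omega))
    have h2 := hh 5 ((pvTb292 5).2 (by omega))
    have h3 := hh 8 ((pvTb292 8).2 (by omega))
    rw [pvOrMask_testBit] at h1 h2 h3
    simp at h1 h2 h3
    exact ⟨h1, h2, h3⟩
  · rintro ⟨h1, h2, h3⟩ t ht
    rw [pvTb292] at ht
    rw [pvOrMask_testBit]
    rcases ht with rfl | rfl | rfl
    · exact ⟨(c, 2), by simp, h1, rfl⟩
    · exact ⟨(f, 5), by simp, h2, rfl⟩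
    · exact ⟨(i, 8), by simp, h3, rfl⟩

theorem pvScan_none (m : Nat) (l : List (String × Nat))
    (h : ∀ v occ, (v, occ) ∈ l → ¬(v ≠ "_" ∧ occ &&& m = m)) :
    pvScanItems m l = none := by
  induction l with
  | nil => rfl
  | cons p rest ih =>
    obtain ⟨v, occ⟩ := p
    simp only [pvScanItems]
    rw [if_neg (h v occ (by simp))]
    exact ih (fun v' occ' hm => h v' occ' (by simp [hm]))

theorem pvScan_some (m : Nat) (l : List (String × Nat)) (x : String) (hx : x ≠ "_")
    (hmem : ∃ occ, (x, occ) ∈ l ∧ occ &&& m = m)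
    (huni : ∀ v occ, (v, occ) ∈ l → v ≠ "_" → occ &&& m = m → v = x) :
    pvScanItems m l = some (x ++ " thắng!") := by
  induction l with
  | nil =>
    obtain ⟨occ, hm, _⟩ := hmem
    simp at hm
  | cons p rest ih =>
    obtain ⟨v, occ⟩ := p
    simp only [pvScanItems]
    by_cases hp : v ≠ "_" ∧ occ &&& m = m
    · rw [if_pos hp, huni v occ (by simp) hp.1 hp.2]
    · rw [if_neg hp]
      apply ih
      · obtain ⟨occ', hm', hpass⟩ := hmem
        rcases List.mem_cons.1 hm' with heq | htail
        · exfalso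
          cases heq
          exact hp ⟨hx, hpass⟩
        · exact ⟨occ', htail, hpass⟩
      · intro v' occ' h1 h2 h3
        exact huni v' occ' (by simp [h1]) h2 h3

theorem pvMkBits_nodup (ps : List (String × Nat)) : (pvMkBits ps).keys.Nodup := by
  unfold pvMkBits
  exact PySem.Dict.nodup_keys_foldl_insert_key ps (·.1) _ PySem.Dict.empty PySem.Dict.nodup_keys_empty

theorem pvMkBits_keys_mem (ps : List (String × Nat)) (w : String) :
    w ∈ (pvMkBits ps).keys ↔ w ∈ ps.map (·.1) := by
  unfold pvMkBits
  rw [PySem.Dict.keys_foldl_insert_key]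
  simp [PySem.Dict.keys_empty]

theorem pvMkBits_mem_items (ps : List (String × Nat)) (w : String) (hw : w ∈ ps.map (·.1)) :
    (w, (pvMkBits ps).getD w 0) ∈ (pvMkBits ps).items := by
  have hc : (pvMkBits ps).contains w = true := by
    rw [PySem.Dict.contains_iff_mem_keys]
    exact (pvMkBits_keys_mem ps w).2 hw
  rw [PySem.Dict.contains_eq_isSome_get?] at hc
  obtain ⟨occ, hocc⟩ := Option.isSome_iff_exists.1 hc
  have hmem := PySem.Dict.mem_items_of_get?_eq_some _ hocc
  rw [PySem.Dict.getD_eq_get?_getD, hocc]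
  exact hmem

theorem pvMkBits_items_val (ps : List (String × Nat)) (v : String) (occ : Nat)
    (h : (v, occ) ∈ (pvMkBits ps).items) : occ = pvOrMask ps v := by
  rw [← pvMkBits_getD ps v]
  exact (PySem.Dict.getD_of_mem_items _ h (pvMkBits_nodup ps) 0).symm

theorem pv_len3 (l : List String) (h : 3 ≤ l.length) :
    ∃ x y z r, l = x :: y :: z :: r := by
  match l, h with
  | x :: y :: z :: r, _ => exact ⟨x, y, z, r, rfl⟩

set_option maxHeartbeats 4000000 in
theorem pv_key (a b c d e f g h i : String) (ra rb rc : List String) :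
    get_status [a::b::c::ra, d::e::f::rb, g::h::i::rc] =
    get_status_alt [a::b::c::ra, d::e::f::rb, g::h::i::rc] := by
  have hl : Int.ofNat (List.length ([a::b::c::ra, d::e::f::rb, g::h::i::rc] : List (List String))) = Int.ofNat 3 := rfl
  have hr : PySem.List.pyRange 0 (Int.ofNat 3) 1 = [0, 1, 2] := by decide
  have hr3 : PySem.List.pyRange 0 (3 : Int) 1 = [0, 1, 2] := by decide
  have h00 : pvCell [a::b::c::ra, d::e::f::rb, g::h::i::rc] 0 0 = a := by
    simp [pvCell, PySem.List.pyGet?, PySem.List.pyIdx?]; rw [if_pos (by omega)]; simp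
  have h01 : pvCell [a::b::c::ra, d::e::f::rb, g::h::i::rc] 0 1 = b := by
    simp [pvCell, PySem.List.pyGet?, PySem.List.pyIdx?]; rw [if_pos (by omega)]; simp
  have h02 : pvCell [a::b::c::ra, d::e::f::rb, g::h::i::rc] 0 2 = c := by
    simp [pvCell, PySem.List.pyGet?, PySem.List.pyIdx?]; rw [if_pos (by omega)]; simp
  have h10 : pvCell [a::b::c::ra, d::e::f::rb, g::h::i::rc] 1 0 = d := by
    simp [pvCell, PySem.List.pyGet?, PySem.List.pyIdx?]; rw [if_pos (by omega)]; simp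
  have h11 : pvCell [a::b::c::ra, d::e::f::rb, g::h::i::rc] 1 1 = e := by
    simp [pvCell, PySem.List.pyGet?, PySem.List.pyIdx?]; rw [if_pos (by omega)]; simp
  have h12 : pvCell [a::b::c::ra, d::e::f::rb, g::h::i::rc] 1 2 = f := by
    simp [pvCell, PySem.List.pyGet?, PySem.List.pyIdx?]; rw [if_pos (by omega)]; simp
  have h20 : pvCell [a::b::c::ra, d::e::f::rb, g::h::i::rc] 2 0 = g := by
    simp [pvCell, PySem.List.pyGet?, PySem.List.pyIdx?]; rw [if_pos (by omega)]; simp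
  have h21 : pvCell [a::b::c::ra, d::e::f::rb, g::h::i::rc] 2 1 = h := by
    simp [pvCell, PySem.List.pyGet?, PySem.List.pyIdx?]; rw [if_pos (by omega)]; simp
  have h22 : pvCell [a::b::c::ra, d::e::f::rb, g::h::i::rc] 2 2 = i := by
    simp [pvCell, PySem.List.pyGet?, PySem.List.pyIdx?]; rw [if_pos (by omega)]; simp
  have hA00 : pvAt (a::b::c::ra) 0 = a := by
    simp [pvAt, PySem.List.pyGet?, PySem.List.pyIdx?]; rw [if_pos (by omega)]; simp
  have hA01 : pvAt (a::b::c::ra) 1 = b := by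
    simp [pvAt, PySem.List.pyGet?, PySem.List.pyIdx?]; rw [if_pos (by omega)]; simp
  have hA02 : pvAt (a::b::c::ra) 2 = c := by
    simp [pvAt, PySem.List.pyGet?, PySem.List.pyIdx?]; rw [if_pos (by omega)]; simp
  have hA10 : pvAt (d::e::f::rb) 0 = d := by
    simp [pvAt, PySem.List.pyGet?, PySem.List.pyIdx?]; rw [if_pos (by omega)]; simp
  have hA11 : pvAt (d::e::f::rb) 1 = e := by
    simp [pvAt, PySem.List.pyGet?, PySem.List.pyIdx?]; rw [if_pos (by omega)]; simp
  have hA12 : pvAt (d::e::f::rb) 2 = f := by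
    simp [pvAt, PySem.List.pyGet?, PySem.List.pyIdx?]; rw [if_pos (by omega)]; simp
  have hA20 : pvAt (g::h::i::rc) 0 = g := by
    simp [pvAt, PySem.List.pyGet?, PySem.List.pyIdx?]; rw [if_pos (by omega)]; simp
  have hA21 : pvAt (g::h::i::rc) 1 = h := by
    simp [pvAt, PySem.List.pyGet?, PySem.List.pyIdx?]; rw [if_pos (by omega)]; simp
  have hA22 : pvAt (g::h::i::rc) 2 = i := by
    simp [pvAt, PySem.List.pyGet?, PySem.List.pyIdx?]; rw [if_pos (by omega)]; simp
  have hps : pvBits3 (a::b::c::ra) (d::e::f::rb) (g::h::i::rc)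
      = pvMkBits [(a,0),(b,1),(c,2),(d,3),(e,4),(f,5),(g,6),(h,7),(i,8)] := by
    simp only [pvBits3, pvMkBits, hr3, List.foldl_cons, List.foldl_nil,
      hA00, hA01, hA02, hA10, hA11, hA12, hA20, hA21, hA22]
    norm_num
    simp only [show Int.toNat 2 = 2 from rfl, show Int.toNat 3 = 3 from rfl, show Int.toNat 4 = 4 from rfl, show Int.toNat 5 = 5 from rfl, show Int.toNat 6 = 6 from rfl, show Int.toNat 7 = 7 from rfl, show Int.toNat 8 = 8 from rfl]
  have s273 : pvScanItems 273 (pvMkBits [(a,0),(b,1),(c,2),(d,3),(e,4),(f,5),(g,6),(h,7),(i,8)]).items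
      = if (e ≠ "_" ∧ a = e ∧ e = i) then some (e ++ " thắng!") else none := by
    by_cases k : e ≠ "_" ∧ a = e ∧ e = i
    · rw [if_pos k]
      apply pvScan_some _ _ _ k.1
      · exact ⟨_, pvMkBits_mem_items _ e (by simp),
          by rw [pvMkBits_getD]; exact (pvW273 a b c d e f g h i e).2 ⟨k.2.1, rfl, k.2.2.symm⟩⟩
      · intro v occ hm hv hpass
        rw [pvMkBits_items_val _ v occ hm] at hpass
        exact ((pvW273 a b c d e f g h i v).1 hpass).2.1.symm
    · rw [if_neg k]
      apply pvScan_none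
      intro v occ hm hcon
      obtain ⟨hv, hpass⟩ := hcon
      rw [pvMkBits_items_val _ v occ hm] at hpass
      obtain ⟨h1, h2, h3⟩ := (pvW273 a b c d e f g h i v).1 hpass
      exact k ⟨by rw [h2]; exact hv, h1.trans h2.symm, h2.trans h3.symm⟩
  have s84 : pvScanItems 84 (pvMkBits [(a,0),(b,1),(c,2),(d,3),(e,4),(f,5),(g,6),(h,7),(i,8)]).items
      = if (e ≠ "_" ∧ c = e ∧ e = g) then some (e ++ " thắng!") else none := by
    by_cases k : e ≠ "_" ∧ c = e ∧ e = g
    · rw [if_pos k]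
      apply pvScan_some _ _ _ k.1
      · exact ⟨_, pvMkBits_mem_items _ e (by simp),
          by rw [pvMkBits_getD]; exact (pvW84 a b c d e f g h i e).2 ⟨k.2.1, rfl, k.2.2.symm⟩⟩
      · intro v occ hm hv hpass
        rw [pvMkBits_items_val _ v occ hm] at hpass
        exact ((pvW84 a b c d e f g h i v).1 hpass).2.1.symm
    · rw [if_neg k]
      apply pvScan_none
      intro v occ hm hcon
      obtain ⟨hv, hpass⟩ := hcon
      rw [pvMkBits_items_val _ v occ hm] at hpass
      obtain ⟨h1, h2, h3⟩ := (pvW84 a b c d e f g h i v).1 hpass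
      exact k ⟨by rw [h2]; exact hv, h1.trans h2.symm, h2.trans h3.symm⟩
  have s7 : pvScanItems 7 (pvMkBits [(a,0),(b,1),(c,2),(d,3),(e,4),(f,5),(g,6),(h,7),(i,8)]).items
      = if (a = b ∧ a = c ∧ a ≠ "_") then some (a ++ " thắng!") else none := by
    by_cases k : a = b ∧ a = c ∧ a ≠ "_"
    · rw [if_pos k]
      apply pvScan_some _ _ _ k.2.2
      · exact ⟨_, pvMkBits_mem_items _ a (by simp),
          by rw [pvMkBits_getD]; exact (pvW7 a b c d e f g h i a).2 ⟨rfl, k.1.symm, k.2.1.symm⟩⟩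
      · intro v occ hm hv hpass
        rw [pvMkBits_items_val _ v occ hm] at hpass
        exact ((pvW7 a b c d e f g h i v).1 hpass).1.symm
    · rw [if_neg k]
      apply pvScan_none
      intro v occ hm hcon
      obtain ⟨hv, hpass⟩ := hcon
      rw [pvMkBits_items_val _ v occ hm] at hpass
      obtain ⟨h1, h2, h3⟩ := (pvW7 a b c d e f g h i v).1 hpass
      exact k ⟨h1.trans h2.symm, h1.trans h3.symm, by rw [h1]; exact hv⟩
  have s73 : pvScanItems 73 (pvMkBits [(a,0),(b,1),(c,2),(d,3),(e,4),(f,5),(g,6),(h,7),(i,8)]).items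
      = if (a = d ∧ a = g ∧ a ≠ "_") then some (a ++ " thắng!") else none := by
    by_cases k : a = d ∧ a = g ∧ a ≠ "_"
    · rw [if_pos k]
      apply pvScan_some _ _ _ k.2.2
      · exact ⟨_, pvMkBits_mem_items _ a (by simp),
          by rw [pvMkBits_getD]; exact (pvW73 a b c d e f g h i a).2 ⟨rfl, k.1.symm, k.2.1.symm⟩⟩
      · intro v occ hm hv hpass
        rw [pvMkBits_items_val _ v occ hm] at hpass
        exact ((pvW73 a b c d e f g h i v).1 hpass).1.symm
    · rw [if_neg k]
      apply pvScan_none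
      intro v occ hm hcon
      obtain ⟨hv, hpass⟩ := hcon
      rw [pvMkBits_items_val _ v occ hm] at hpass
      obtain ⟨h1, h2, h3⟩ := (pvW73 a b c d e f g h i v).1 hpass
      exact k ⟨h1.trans h2.symm, h1.trans h3.symm, by rw [h1]; exact hv⟩
  have s56 : pvScanItems 56 (pvMkBits [(a,0),(b,1),(c,2),(d,3),(e,4),(f,5),(g,6),(h,7),(i,8)]).items
      = if (d = e ∧ d = f ∧ d ≠ "_") then some (d ++ " thắng!") else none := by
    by_cases k : d = e ∧ d = f ∧ d ≠ "_"
    · rw [if_pos k]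
      apply pvScan_some _ _ _ k.2.2
      · exact ⟨_, pvMkBits_mem_items _ d (by simp),
          by rw [pvMkBits_getD]; exact (pvW56 a b c d e f g h i d).2 ⟨rfl, k.1.symm, k.2.1.symm⟩⟩
      · intro v occ hm hv hpass
        rw [pvMkBits_items_val _ v occ hm] at hpass
        exact ((pvW56 a b c d e f g h i v).1 hpass).1.symm
    · rw [if_neg k]
      apply pvScan_none
      intro v occ hm hcon
      obtain ⟨hv, hpass⟩ := hcon
      rw [pvMkBits_items_val _ v occ hm] at hpass
      obtain ⟨h1, h2, h3⟩ := (pvW56 a b c d e f g h i v).1 hpass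
      exact k ⟨h1.trans h2.symm, h1.trans h3.symm, by rw [h1]; exact hv⟩
  have s146 : pvScanItems 146 (pvMkBits [(a,0),(b,1),(c,2),(d,3),(e,4),(f,5),(g,6),(h,7),(i,8)]).items
      = if (b = e ∧ b = h ∧ b ≠ "_") then some (b ++ " thắng!") else none := by
    by_cases k : b = e ∧ b = h ∧ b ≠ "_"
    · rw [if_pos k]
      apply pvScan_some _ _ _ k.2.2
      · exact ⟨_, pvMkBits_mem_items _ b (by simp),
          by rw [pvMkBits_getD]; exact (pvW146 a b c d e f g h i b).2 ⟨rfl, k.1.symm, k.2.1.symm⟩⟩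
      · intro v occ hm hv hpass
        rw [pvMkBits_items_val _ v occ hm] at hpass
        exact ((pvW146 a b c d e f g h i v).1 hpass).1.symm
    · rw [if_neg k]
      apply pvScan_none
      intro v occ hm hcon
      obtain ⟨hv, hpass⟩ := hcon
      rw [pvMkBits_items_val _ v occ hm] at hpass
      obtain ⟨h1, h2, h3⟩ := (pvW146 a b c d e f g h i v).1 hpass
      exact k ⟨h1.trans h2.symm, h1.trans h3.symm, by rw [h1]; exact hv⟩
  have s448 : pvScanItems 448 (pvMkBits [(a,0),(b,1),(c,2),(d,3),(e,4),(f,5),(g,6),(h,7),(i,8)]).items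
      = if (g = h ∧ g = i ∧ g ≠ "_") then some (g ++ " thắng!") else none := by
    by_cases k : g = h ∧ g = i ∧ g ≠ "_"
    · rw [if_pos k]
      apply pvScan_some _ _ _ k.2.2
      · exact ⟨_, pvMkBits_mem_items _ g (by simp),
          by rw [pvMkBits_getD]; exact (pvW448 a b c d e f g h i g).2 ⟨rfl, k.1.symm, k.2.1.symm⟩⟩
      · intro v occ hm hv hpass
        rw [pvMkBits_items_val _ v occ hm] at hpass
        exact ((pvW448 a b c d e f g h i v).1 hpass).1.symm
    · rw [if_neg k]
      apply pvScan_none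
      intro v occ hm hcon
      obtain ⟨hv, hpass⟩ := hcon
      rw [pvMkBits_items_val _ v occ hm] at hpass
      obtain ⟨h1, h2, h3⟩ := (pvW448 a b c d e f g h i v).1 hpass
      exact k ⟨h1.trans h2.symm, h1.trans h3.symm, by rw [h1]; exact hv⟩
  have s292 : pvScanItems 292 (pvMkBits [(a,0),(b,1),(c,2),(d,3),(e,4),(f,5),(g,6),(h,7),(i,8)]).items
      = if (c = f ∧ c = i ∧ c ≠ "_") then some (c ++ " thắng!") else none := by
    by_cases k : c = f ∧ c = i ∧ c ≠ "_"
    · rw [if_pos k]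
      apply pvScan_some _ _ _ k.2.2
      · exact ⟨_, pvMkBits_mem_items _ c (by simp),
          by rw [pvMkBits_getD]; exact (pvW292 a b c d e f g h i c).2 ⟨rfl, k.1.symm, k.2.1.symm⟩⟩
      · intro v occ hm hv hpass
        rw [pvMkBits_items_val _ v occ hm] at hpass
        exact ((pvW292 a b c d e f g h i v).1 hpass).1.symm
    · rw [if_neg k]
      apply pvScan_none
      intro v occ hm hcon
      obtain ⟨hv, hpass⟩ := hcon
      rw [pvMkBits_items_val _ v occ hm] at hpass
      obtain ⟨h1, h2, h3⟩ := (pvW292 a b c d e f g h i v).1 hpass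
      exact k ⟨h1.trans h2.symm, h1.trans h3.symm, by rw [h1]; exact hv⟩
  have hconB : (pvMkBits [(a,0),(b,1),(c,2),(d,3),(e,4),(f,5),(g,6),(h,7),(i,8)]).contains "_"
      = decide (a = "_" ∨ b = "_" ∨ c = "_" ∨ d = "_" ∨ e = "_" ∨ f = "_" ∨ g = "_" ∨ h = "_" ∨ i = "_") := by
    rw [PySem.Dict.contains_eq_decide_mem_keys]
    refine decide_eq_decide.2 ?_
    rw [pvMkBits_keys_mem]
    simp [eq_comm]
  simp only [get_status, get_status_alt, hps, hl, hr, pvLoopA, pvInner, pvWinMasks,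
    h00, h01, h02, h10, h11, h12, h20, h21, h22, s273, s84, s7, s73, s56, s146, s448, s292, hconB]
  by_cases k1 : e ≠ "_" ∧ a = e ∧ e = i
  · obtain ⟨hx, h1, h2⟩ := k1
    subst h1; subst h2
    simp [hx]
  by_cases k2 : e ≠ "_" ∧ c = e ∧ e = g
  · obtain ⟨hx, h1, h2⟩ := k2
    subst h1; subst h2
    simp [hx]
    try ((repeat' split) <;> rfl)
  by_cases k3 : a = b ∧ a = c ∧ a ≠ "_"
  · obtain ⟨h1, h2, hx⟩ := k3
    subst h1; subst h2
    simp [k1, k2, hx]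
  by_cases k4 : a = d ∧ a = g ∧ a ≠ "_"
  · obtain ⟨h1, h2, hx⟩ := k4
    subst h1; subst h2
    simp [k1, k2, hx]
    try ((repeat' split) <;> rfl)
  by_cases k5 : d = e ∧ d = f ∧ d ≠ "_"
  · obtain ⟨h1, h2, hx⟩ := k5
    subst h1; subst h2
    simp [k3, k4, hx]
    try ((repeat' split) <;> rfl)
  by_cases k6 : b = e ∧ b = h ∧ b ≠ "_"
  · obtain ⟨h1, h2, hx⟩ := k6
    subst h1; subst h2
    simp [k3, k4, k5, hx]
    try ((repeat' split) <;> rfl)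
  by_cases k7 : g = h ∧ g = i ∧ g ≠ "_"
  · obtain ⟨h1, h2, hx⟩ := k7
    subst h1; subst h2
    simp [k1, k2, k3, k4, k5, k6, hx]
  by_cases k8 : c = f ∧ c = i ∧ c ≠ "_"
  · obtain ⟨h1, h2, hx⟩ := k8
    subst h1; subst h2
    simp [k1, k2, k3, k4, k5, k6, k7, hx]
  simp only [if_neg k1, if_neg k2, if_neg k3, if_neg k4, if_neg k5, if_neg k6, if_neg k7, if_neg k8]
  by_cases ha : a = "_" <;> by_cases hb : b = "_" <;> by_cases hc2 : c = "_" <;>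
    by_cases hd : d = "_" <;> by_cases he2 : e = "_" <;> by_cases hf : f = "_" <;>
    by_cases hg : g = "_" <;> by_cases hh2 : h = "_" <;> by_cases hi2 : i = "_" <;>
    simp [ha, hb, hc2, hd, he2, hf, hg, hh2, hi2]

-- ===== VERDICT (by name: the statement is the Claim_ definition above) =====
theorem get_status_spec : Claim_equal_get_status := by
  intro b _ hpre
  obtain ⟨hlen, hrows⟩ := hpre
  obtain ⟨r0, r1, r2, rfl⟩ := List.length_eq_three.mp hlen
  obtain ⟨a0, a1, a2, ta, h0⟩ := pv_len3 r0 (hrows r0 (by simp))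
  obtain ⟨b0, b1, b2, tb, h1⟩ := pv_len3 r1 (hrows r1 (by simp))
  obtain ⟨c0, c1, c2, tc, h2⟩ := pv_len3 r2 (hrows r2 (by simp))
  subst h0 h1 h2
  exact pv_key _ _ _ _ _ _ _ _ _ _ _ _
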